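-- pv_equiv track=rewrite | github.com/gerssivaldosantos/2048-python | jogo.py | somar_adjacentes
-- ===== SOURCE A (Python) =====
-- def somar_adjacentes(linha, direcao):
--
--     if direcao == "a":
--         linha = linha[::-1]
--
--     tam_linha = len(linha)
--     aux = []
--     excluidos = []
--     ultimo = linha[-1:][0]
--     score = 0
--
--     # percorrendo do primeiro até o
--     # penultimo número da linha
--
--     for i in range(tam_linha - 1):
--
--         if i not in excluidos:
--
--             atual = linha[i]
--             prox = linha[i + 1]
--             if atual == prox:
--                 aux.append(0)
--                 aux.append(atual + prox)
--                 score += atual + prox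
--                 excluidos.append(i + 1)
--             else:
--                 aux.append(atual)
--     if len(aux) != tam_linha:
--         aux.append(ultimo)
--
--     if direcao == "a":
--         aux = aux[::-1]
--
--     return aux, score
-- ===== SOURCE B (Python) =====
-- def somar_adjacentes(linha, direcao):
--     if direcao == "a":
--         linha = linha[::-1]
--     aux = []
--     score = 0
--     rest = linha
--     while len(rest) >= 2:
--         if rest[0] == rest[1]:
--             s = rest[0] + rest[1]
--             aux.append(0)
--             aux.append(s)
--             score += s
--             rest = rest[2:]
--         else:
--             aux.append(rest[0])
--             rest = rest[1:]
--     aux.extend(rest)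
--     if direcao == "a":
--         aux = aux[::-1]
--     return aux, score
-- ===== Notes on version B (the rewrite author's own statement) =====
-- stated objective: simpler
-- what changed: Replaces the range-for with an excluidos skip-list, the saved 'ultimo' and the len(aux)-vs-len(linha) tail test by a loop that consumes the remaining sublist two elements at a time on a merge and simply extends with whatever is left.
import Mathlib
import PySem

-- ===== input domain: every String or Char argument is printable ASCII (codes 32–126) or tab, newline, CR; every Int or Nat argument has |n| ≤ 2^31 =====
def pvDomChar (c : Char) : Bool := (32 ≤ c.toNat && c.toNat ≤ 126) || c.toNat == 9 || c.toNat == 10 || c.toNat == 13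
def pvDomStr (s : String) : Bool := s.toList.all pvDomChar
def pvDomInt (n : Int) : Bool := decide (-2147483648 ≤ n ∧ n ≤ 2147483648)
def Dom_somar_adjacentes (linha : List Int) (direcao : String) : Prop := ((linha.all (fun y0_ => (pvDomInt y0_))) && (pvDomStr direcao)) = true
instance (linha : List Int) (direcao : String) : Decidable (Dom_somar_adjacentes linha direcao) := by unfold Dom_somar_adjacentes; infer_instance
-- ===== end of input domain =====

-- B drops A's excluidos skip-list, saved 'ultimo' and len(aux)-based tail test and instead
-- consumes the remaining sublist two-at-a-time on a merge (objective: simpler); the empty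
-- row, on which A raises IndexError at linha[-1:][0], is excluded by Pre_.

-- ===== PORT A =====
-- loop body of A's 'for i in range(tam_linha - 1)'; state = (aux, excluidos, score).
-- linha.getD i 0 / getD (i+1) 0 port linha[i] / linha[i+1]: both indices are in range for
-- every i produced by range(tam_linha - 1), so the default 0 is never used.
def aStep (linha : List Int) (st : List Int × List Nat × Int) (i : Nat) : List Int × List Nat × Int :=
  let (aux, exc, score) := st
  if i ∈ exc then (aux, exc, score)
  else
    let atual := linha.getD i 0
    let prox := linha.getD (i + 1) 0
    if atual = prox then (aux ++ [0, atual + prox], exc ++ [i + 1], score + (atual + prox))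
    else (aux ++ [atual], exc, score)

def somar_adjacentes (linha : List Int) (direcao : String) : List Int × Int :=
  let linha := if direcao == "a" then linha.reverse else linha   -- linha[::-1]
  let tam_linha := linha.length
  -- ultimo = linha[-1:][0]; IndexError on [] (the pyGetD default 0 is unreachable under Pre_)
  let ultimo := PySem.List.pyGetD (PySem.List.slice linha (some (-1)) none) 0 0
  let st := (List.range (tam_linha - 1)).foldl (aStep linha) ([], [], 0)
  let aux := if st.1.length ≠ tam_linha then st.1 ++ [ultimo] else st.1
  (if direcao == "a" then aux.reverse else aux, st.2.2)

-- ===== PORT B =====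
-- B's 'while len(rest) >= 2' loop; 'aux.extend(rest)' is the '| rest' fallthrough.
def bGo : List Int → List Int → Int → List Int × Int
  | x :: y :: rest, aux, score =>
      if x = y then bGo rest (aux ++ [0, x + y]) (score + (x + y))
      else bGo (y :: rest) (aux ++ [x]) score
  | rest, aux, score => (aux ++ rest, score)

def somar_adjacentes_alt (linha : List Int) (direcao : String) : List Int × Int :=
  let linha := if direcao == "a" then linha.reverse else linha
  let r := bGo linha [] 0
  (if direcao == "a" then r.1.reverse else r.1, r.2)

-- ===== PRECONDITION & SPEC =====
-- Pre_ excludes only the empty row, on which A raises IndexError at linha[-1:][0].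
def Pre_somar_adjacentes (linha : List Int) (direcao : String) : Prop := linha ≠ []
instance (linha : List Int) (direcao : String) : Decidable (Pre_somar_adjacentes linha direcao) := by unfold Pre_somar_adjacentes; infer_instance
def pvWitness_somar_adjacentes : List Int × String := ([2, 2, 4], "a")

def Spec_somar_adjacentes (linha : List Int) (direcao : String) (out : List Int × Int) : Prop := out = somar_adjacentes_alt linha direcao
instance (linha : List Int) (direcao : String) (out : List Int × Int) : Decidable (Spec_somar_adjacentes linha direcao out) := by unfold Spec_somar_adjacentes; infer_instance

-- ===== CLAIM (what is proved, stated in full; the proofs are below) =====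
def Claim_equal_somar_adjacentes : Prop := ∀ (linha : List Int) (direcao : String), Dom_somar_adjacentes linha direcao → Pre_somar_adjacentes linha direcao → Spec_somar_adjacentes linha direcao (somar_adjacentes linha direcao)

-- ===== LEMMAS AND PROOFS =====

-- 'ultimo' is the last element of a nonempty row.
lemma ultimo_eq (linha : List Int) :
    PySem.List.pyGetD (PySem.List.slice linha (some (-1)) none) 0 0
      = linha.getD (linha.length - 1) 0 := by
  rw [PySem.List.slice_from_neg_one, PySem.List.pyGetD_zero]
  simp [List.getD, List.getElem?_drop]

-- the sublist from index i, exposed two elements deep when i + 1 < length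
lemma drop_two (linha : List Int) (i : Nat) (h : i + 1 < linha.length) :
    linha.drop i = linha.getD i 0 :: linha.getD (i + 1) 0 :: linha.drop (i + 2) := by
  rw [List.drop_eq_getElem_cons (by omega), List.drop_eq_getElem_cons h,
      List.getD_eq_getElem linha 0 (by omega : i < linha.length),
      List.getD_eq_getElem linha 0 h]

-- A's fold over the remaining indices, plus its tail step, equals B's loop on the
-- remaining sublist.
lemma loop_eq (linha : List Int) :
    ∀ (k i : Nat) (aux : List Int) (exc : List Nat) (score : Int),
      i + k + 1 = linha.length →
      (∀ j ∈ exc, j < i) →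
      aux.length = i →
      (let st := (List.range' i k).foldl (aStep linha) (aux, exc, score)
       ((if st.1.length ≠ linha.length
           then st.1 ++ [linha.getD (linha.length - 1) 0] else st.1), st.2.2))
        = bGo (linha.drop i) aux score := by
  intro k
  induction k using Nat.strong_induction_on with
  | _ k ih =>
    intro i aux exc score hlen hexc hauxlen
    match k with
    | 0 =>
      -- the loop is over; B sees the one remaining element
      have hdrop : linha.drop i = [linha.getD i 0] := by
        rw [List.drop_eq_getElem_cons (by omega : i < linha.length),
            List.drop_eq_nil_of_le (by omega : linha.length ≤ i + 1),
            List.getD_eq_getElem linha 0 (by omega : i < linha.length)]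
      simp only [List.range', List.foldl_nil, hdrop, bGo]
      rw [if_pos (show aux.length ≠ linha.length by omega),
          show linha.length - 1 = i by omega]
    | k' + 1 =>
      have hnot : i ∉ exc := fun hm => absurd (hexc i hm) (by omega)
      have hcond : i + 1 < linha.length := by omega
      rw [List.range'_succ, List.foldl_cons, drop_two linha i hcond]
      by_cases heq : linha.getD i 0 = linha.getD (i + 1) 0
      · -- merge at i
        rw [show aStep linha (aux, exc, score) i
              = (aux ++ [0, linha.getD i 0 + linha.getD (i + 1) 0], exc ++ [i + 1],
                 score + (linha.getD i 0 + linha.getD (i + 1) 0)) by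
              simp only [aStep]; rw [if_neg hnot, if_pos heq]]
        rw [show bGo (linha.getD i 0 :: linha.getD (i + 1) 0 :: linha.drop (i + 2)) aux score
              = bGo (linha.drop (i + 2)) (aux ++ [0, linha.getD i 0 + linha.getD (i + 1) 0])
                  (score + (linha.getD i 0 + linha.getD (i + 1) 0)) by
              rw [bGo, if_pos heq]]
        match k' with
        | 0 =>
          -- merge on the last pair: aux already has full length, no tail append
          have hdrop2 : linha.drop (i + 2) = [] := List.drop_eq_nil_of_le (by omega)
          have hl : (aux ++ [0, linha.getD i 0 + linha.getD (i + 1) 0]).length = linha.length := by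
            simp [hauxlen]; omega
          simp only [List.range', List.foldl_nil, hdrop2, bGo, if_neg (by omega : ¬ (aux ++ [0, linha.getD i 0 + linha.getD (i + 1) 0]).length ≠ linha.length)]
          simp
        | k'' + 1 =>
          -- the next iteration i+1 is skipped (i+1 ∈ excluidos)
          rw [List.range'_succ, List.foldl_cons]
          rw [show aStep linha (aux ++ [0, linha.getD i 0 + linha.getD (i + 1) 0], exc ++ [i + 1],
                 score + (linha.getD i 0 + linha.getD (i + 1) 0)) (i + 1)
              = (aux ++ [0, linha.getD i 0 + linha.getD (i + 1) 0], exc ++ [i + 1],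
                 score + (linha.getD i 0 + linha.getD (i + 1) 0)) by
              simp only [aStep]; rw [if_pos (by simp)]]
          exact ih k'' (by omega) (i + 1 + 1)
            (aux ++ [0, linha.getD i 0 + linha.getD (i + 1) 0]) (exc ++ [i + 1])
            (score + (linha.getD i 0 + linha.getD (i + 1) 0))
            (by omega)
            (by intro j hj; rcases List.mem_append.mp hj with hm | hm
                · exact Nat.lt_of_lt_of_le (hexc j hm) (by omega)
                · simp at hm; omega)
            (by simp [hauxlen])
      · -- no merge at i
        rw [show aStep linha (aux, exc, score) i = (aux ++ [linha.getD i 0], exc, score) by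
              simp only [aStep]; rw [if_neg hnot, if_neg heq]]
        rw [show bGo (linha.getD i 0 :: linha.getD (i + 1) 0 :: linha.drop (i + 2)) aux score
              = bGo (linha.getD (i + 1) 0 :: linha.drop (i + 2)) (aux ++ [linha.getD i 0]) score by
              rw [bGo, if_neg heq]]
        rw [show linha.getD (i + 1) 0 :: linha.drop (i + 2) = linha.drop (i + 1) by
              rw [List.drop_eq_getElem_cons hcond, List.getD_eq_getElem _ _ hcond]]
        exact ih k' (by omega) (i + 1) (aux ++ [linha.getD i 0]) exc score
          (by omega) (fun j hj => Nat.lt_of_lt_of_le (hexc j hj) (by omega))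
          (by simp [hauxlen])

lemma main_eq (linha : List Int) (direcao : String) (h : linha ≠ []) :
    somar_adjacentes linha direcao = somar_adjacentes_alt linha direcao := by
  unfold somar_adjacentes somar_adjacentes_alt
  have hLne : (if direcao == "a" then linha.reverse else linha) ≠ [] := by
    split <;> simp [h]
  set L := if direcao == "a" then linha.reverse else linha with hL
  have hlen : 0 < L.length := List.length_pos_iff.mpr hLne
  have hkey := loop_eq L (L.length - 1) 0 [] [] 0 (by omega) (by simp) rfl
  simp only [List.drop_zero] at hkey
  simp only [List.range_eq_range', ultimo_eq L]
  rw [← hkey]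

-- ===== VERDICT (by name: the statement is the Claim_ definition above) =====
theorem somar_adjacentes_spec : Claim_equal_somar_adjacentes := by
  intro linha direcao _ hpre
  unfold Spec_somar_adjacentes
  exact main_eq linha direcao hpre
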